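-- pv_equiv track=rewrite | github.com/Hyungeol94/Software_Competency_Practice | 20230507 도면 훑어보기/소스.py | sharps_bfs
-- ===== SOURCE A (Python) =====
-- from collections import deque
--
-- def sharps_bfs(matrix, i, j, visited):
--     # 6개 연달아 연결되어 있으면 return True
--     # els return False
--     dx = [1, 0, -1, 0]
--     dy = [0, -1, 0, 1]
--
--     my_queue = deque()
--     my_queue.append((i, j))
--     count = 1
--     visited[i][j] = True
--
--     while my_queue:
--         current_x_position, current_y_position = my_queue.popleft()
--         for i in range(4):
--             next_x_position = current_x_position + dx[i]
--             next_y_position = current_y_position + dy[i]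
--             if next_x_position < 1 or 9 <= next_x_position or next_y_position < 1 or 19 <= next_y_position:
--                 continue
--             if not visited[next_x_position][next_y_position] and matrix[next_x_position][next_y_position] == '#':
--                 my_queue.append((next_x_position, next_y_position))
--                 visited[next_x_position][next_y_position] = True
--                 count += 1
--
--     if count >= 6:
--         return True
--     return False
-- ===== SOURCE B (Python) =====
-- def _flood(matrix, visited, x, y):
--     # recursive DFS flood-fill: mark the cell, then sum the sizes of the
--     # four neighbouring sub-floods (same bounds and tests as the task).
--     visited[x][y] = True
--     total = 1
--     for dx, dy in ((1, 0), (0, -1), (-1, 0), (0, 1)):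
--         nx, ny = x + dx, y + dy
--         if 1 <= nx < 9 and 1 <= ny < 19 and not visited[nx][ny] and matrix[nx][ny] == '#':
--             total += _flood(matrix, visited, nx, ny)
--     return total
--
--
-- def sharps_bfs(matrix, i, j, visited):
--     return _flood(matrix, visited, i, j) >= 6
-- ===== Notes on version B (the rewrite author's own statement) =====
-- stated objective: alternative
-- what changed: Replaces the deque-based BFS (explicit queue, visited marks, running counter) by a recursive DFS flood-fill helper that marks a cell and sums the sizes of the four neighbouring sub-floods, returning total >= 6.
import Mathlib
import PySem

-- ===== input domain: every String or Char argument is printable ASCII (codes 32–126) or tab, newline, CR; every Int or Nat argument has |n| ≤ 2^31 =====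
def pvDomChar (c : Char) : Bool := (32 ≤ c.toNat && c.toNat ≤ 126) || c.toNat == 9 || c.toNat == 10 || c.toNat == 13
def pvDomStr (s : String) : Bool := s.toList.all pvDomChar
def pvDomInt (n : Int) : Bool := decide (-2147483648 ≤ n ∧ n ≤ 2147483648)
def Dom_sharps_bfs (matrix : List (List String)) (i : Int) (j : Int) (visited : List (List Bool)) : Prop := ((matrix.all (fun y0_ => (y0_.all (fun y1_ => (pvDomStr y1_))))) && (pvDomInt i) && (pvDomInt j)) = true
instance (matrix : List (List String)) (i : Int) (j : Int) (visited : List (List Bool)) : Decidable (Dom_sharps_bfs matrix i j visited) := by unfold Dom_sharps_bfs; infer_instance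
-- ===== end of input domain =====

-- B replaces A's deque-BFS by a recursive DFS flood-fill (objective: alternative); both
-- mutate `visited` identically in Python — the theorems below are about the return value.

-- shared cell primitives (Python reads/writes on the nested lists, via PySem):
-- visited[x][y] / matrix[x][y] as a total read (the default is never reached inside Pre_)
def pvMGetB (V : List (List Bool)) (x y : Int) : Bool :=
  (((PySem.List.pyGet? V x).bind (fun r => PySem.List.pyGet? r y)).getD false)

def pvMGetS (m : List (List String)) (x y : Int) : String :=
  (((PySem.List.pyGet? m x).bind (fun r => PySem.List.pyGet? r y)).getD "")

-- visited[x][y] = True (Python index semantics; no-op exactly where Python raises, outside Pre_)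
def pvMSet (V : List (List Bool)) (x y : Int) : List (List Bool) :=
  match PySem.List.pyGet? V x with
  | none => V
  | some row => PySem.List.pySetD V x (PySem.List.pySetD row y true)

-- the dx/dy pairs of A (and the neighbour order of B)
def pvDirs : List (Int × Int) := [(1, 0), (0, -1), (-1, 0), (0, 1)]

-- ===== PORT A =====
-- the while-loop over the deque; the fuel 400 is a totality guard only (it is proved
-- unreachable inside Pre_: at most 1 + 144 cells are ever dequeued)
def pvBfsLoop (matrix : List (List String)) : Nat → List (Int × Int) → List (List Bool) → Int → (List (List Bool) × Int)
  | 0, _, V, c => (V, c)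
  | _ + 1, [], V, c => (V, c)
  | fuel + 1, (x, y) :: q, V, c =>
      let s := pvDirs.foldl (fun (s : List (Int × Int) × List (List Bool) × Int) d =>
        let nx := x + d.1
        let ny := y + d.2
        if nx < 1 ∨ 9 ≤ nx ∨ ny < 1 ∨ 19 ≤ ny then s
        else if pvMGetB s.2.1 nx ny = false ∧ pvMGetS matrix nx ny = "#" then
          (s.1 ++ [(nx, ny)], pvMSet s.2.1 nx ny, s.2.2 + 1)
        else s) (q, V, c)
      pvBfsLoop matrix fuel s.1 s.2.1 s.2.2

def sharps_bfs (matrix : List (List String)) (i : Int) (j : Int) (visited : List (List Bool)) : Bool :=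
  let V0 := pvMSet visited i j
  let r := pvBfsLoop matrix 400 [(i, j)] V0 1
  decide (6 ≤ r.2)

-- ===== PORT B =====
-- the recursive DFS flood-fill of Source B; the fuel 400 is a totality guard only (proved
-- unreachable inside Pre_: every recursive call marks a fresh cell of the 144-cell window)
def pvFlood (matrix : List (List String)) : Nat → Int → Int → List (List Bool) → (Int × List (List Bool))
  | 0, _, _, V => (1, V)
  | fuel + 1, x, y, V =>
      let V1 := pvMSet V x y
      pvDirs.foldl (fun (s : Int × List (List Bool)) d =>
        let nx := x + d.1
        let ny := y + d.2
        if (1 ≤ nx ∧ nx < 9) ∧ (1 ≤ ny ∧ ny < 19) ∧ pvMGetB s.2 nx ny = false ∧ pvMGetS matrix nx ny = "#" then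
          let r := pvFlood matrix fuel nx ny s.2
          (s.1 + r.1, r.2)
        else s) (1, V1)

def sharps_bfs_alt (matrix : List (List String)) (i : Int) (j : Int) (visited : List (List Bool)) : Bool :=
  decide (6 ≤ (pvFlood matrix 400 i j visited).1)

-- ===== PRECONDITION & SPEC =====
-- the 9×19 window (exclusive bounds 9 and 19 of A) inside which all neighbour reads happen
abbrev pvWin (p : Int × Int) : Prop := 1 ≤ p.1 ∧ p.1 < 9 ∧ 1 ≤ p.2 ∧ p.2 < 19

-- the seed indexes visited without wraparound
abbrev pvInShape (V : List (List Bool)) (i j : Int) : Prop :=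
  0 ≤ i ∧ i < V.length ∧ 0 ≤ j ∧ j < ((V[i.toNat]?).getD []).length

-- both grids cover the whole window the loops can touch
abbrev pvFullShape (matrix : List (List String)) (V : List (List Bool)) : Prop :=
  9 ≤ V.length ∧ 9 ≤ matrix.length ∧
  ∀ k : Nat, k < 9 → 19 ≤ ((V[k]?).getD []).length ∧ 19 ≤ ((matrix[k]?).getD []).length

-- the seed indexes visited, with Python's negative-index wraparound allowed
abbrev pvSeedIdx (V : List (List Bool)) (i j : Int) : Prop :=
  PySem.Raise.InRange V.length i ∧
  PySem.Raise.InRange ((V[(if i < 0 then i + V.length else i).toNat]?).getD []).length j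

-- no neighbour of the seed lies in the window (then no cell but the seed is ever indexed)
abbrev pvNoTouch (i j : Int) : Prop := ∀ d ∈ pvDirs, ¬ pvWin (i + d.1, j + d.2)

-- Pre_ excludes the inputs on which the Python A raises IndexError (the seed or a reached
-- neighbour indexes outside visited/matrix); it is stated as two closed-form sufficient
-- shapes — full 9×19 grids with a non-negative in-range seed, or a seed whose whole
-- neighbourhood misses the window — which also leaves out some odd-shaped grids whose
-- component happens to stay inside them (see cites); B raises there exactly where A does.
def Pre_sharps_bfs (matrix : List (List String)) (i : Int) (j : Int) (visited : List (List Bool)) : Prop :=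
  (pvInShape visited i j ∧ pvFullShape matrix visited) ∨ (pvSeedIdx visited i j ∧ pvNoTouch i j)

instance (matrix : List (List String)) (i : Int) (j : Int) (visited : List (List Bool)) :
    Decidable (Pre_sharps_bfs matrix i j visited) := by unfold Pre_sharps_bfs; infer_instance

def pvWitness_sharps_bfs : List (List String) × Int × Int × List (List Bool) :=
  (List.replicate 9 (List.replicate 19 "#"), 1, 1, List.replicate 9 (List.replicate 19 false))

def Spec_sharps_bfs (matrix : List (List String)) (i : Int) (j : Int) (visited : List (List Bool)) (out : Bool) : Prop := out = sharps_bfs_alt matrix i j visited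
instance (matrix : List (List String)) (i : Int) (j : Int) (visited : List (List Bool)) (out : Bool) : Decidable (Spec_sharps_bfs matrix i j visited out) := by unfold Spec_sharps_bfs; infer_instance

-- ===== CLAIM (what is proved, stated in full; the proofs are below) =====
def Claim_equal_sharps_bfs : Prop := ∀ (matrix : List (List String)) (i : Int) (j : Int) (visited : List (List Bool)), Dom_sharps_bfs matrix i j visited → Pre_sharps_bfs matrix i j visited → Spec_sharps_bfs matrix i j visited (sharps_bfs matrix i j visited)

-- ===== LEMMAS AND PROOFS =====

-- ---------- ghost notions used by the proofs ----------

def pvWinF : Finset (Int × Int) :=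
  ((Finset.range 8) ×ˢ (Finset.range 18)).image (fun ab => ((ab.1 : Int) + 1, (ab.2 : Int) + 1))

-- a cell the loops may flood into: in the window, not initially visited, and a '#'
def pvGood (mat : List (List String)) (v0 : List (List Bool)) (p : Int × Int) : Prop :=
  pvWin p ∧ pvMGetB v0 p.1 p.2 = false ∧ pvMGetS mat p.1 p.2 = "#"

def pvClosed (mat : List (List String)) (v0 : List (List Bool)) (T : Finset (Int × Int)) : Prop :=
  ∀ p ∈ T, ∀ d ∈ pvDirs, pvGood mat v0 (p.1 + d.1, p.2 + d.2) → (p.1 + d.1, p.2 + d.2) ∈ T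

-- the current visited matrix agrees, on the window, with "initially visited or in S"
def pvCons (v0 V : List (List Bool)) (S : Finset (Int × Int)) : Prop :=
  ∀ w : Int × Int, pvWin w → pvMGetB V w.1 w.2 = (pvMGetB v0 w.1 w.2 || decide (w ∈ S))

-- window cells still markable given ghost set S (the termination measure)
def pvUwS (v0 : List (List Bool)) (S : Finset (Int × Int)) : Nat :=
  (pvWinF.filter (fun w => pvMGetB v0 w.1 w.2 = false ∧ w ∉ S)).card

def pvSameShape (V W : List (List Bool)) : Prop :=
  V.length = W.length ∧ ∀ k : Nat, ((V[k]?).getD []).length = ((W[k]?).getD []).length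

-- ---------- primitive lemmas ----------

theorem pvPyGet_nonneg {α : Type} (xs : List α) (i : Int) (h : 0 ≤ i) :
    PySem.List.pyGet? xs i = xs[i.toNat]? := by
  simp only [PySem.List.pyGet?, PySem.List.pyIdx?, if_pos h]
  split
  · simp
  · rename_i hlt
    rw [List.getElem?_eq_none (by omega)]
    rfl

theorem pvMGetB_nonneg (V : List (List Bool)) (a b : Int) (ha : 0 ≤ a) (hb : 0 ≤ b) :
    pvMGetB V a b = (((V[a.toNat]?).getD [])[b.toNat]?).getD false := by
  unfold pvMGetB
  rw [pvPyGet_nonneg _ _ ha]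
  cases h : V[a.toNat]? with
  | none => simp
  | some row => simp [pvPyGet_nonneg _ _ hb]

theorem pvMSet_eq (V : List (List Bool)) (x y : Int) (hx0 : 0 ≤ x) (hxl : x.toNat < V.length) :
    pvMSet V x y = V.set x.toNat (PySem.List.pySetD (V[x.toNat]'hxl) y true) := by
  unfold pvMSet
  rw [pvPyGet_nonneg _ _ hx0, List.getElem?_eq_getElem hxl]
  simp [PySem.List.pySetD_of_nonneg _ _ hx0]

theorem pvMGetB_mset (V : List (List Bool)) (x y a b : Int)
    (hx0 : 0 ≤ x) (hy0 : 0 ≤ y) (hxl : x.toNat < V.length)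
    (hyl : y.toNat < ((V[x.toNat]?).getD []).length)
    (ha : 0 ≤ a) (hb : 0 ≤ b) :
    pvMGetB (pvMSet V x y) a b = if a = x ∧ b = y then true else pvMGetB V a b := by
  rw [pvMSet_eq V x y hx0 hxl]
  rw [pvMGetB_nonneg _ _ _ ha hb, pvMGetB_nonneg V a b ha hb]
  rw [List.getElem?_eq_getElem hxl] at hyl
  simp only [Option.getD_some] at hyl
  rw [PySem.List.pySetD_of_nonneg _ _ hy0]
  rw [List.getElem?_set]
  by_cases hax : a = x
  · subst hax
    rw [if_pos rfl, if_pos hxl]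
    simp only [Option.getD_some]
    rw [List.getElem?_set]
    by_cases hby : b = y
    · subst hby
      rw [if_pos rfl, if_pos hyl]
      simp
    · have hbyn : ¬ y.toNat = b.toNat := by omega
      rw [if_neg hbyn, if_neg (fun hc => hby hc.2), List.getElem?_eq_getElem hxl]
      simp
  · have haxn : ¬ x.toNat = a.toNat := by omega
    rw [if_neg haxn, if_neg (fun hc => hax hc.1)]

theorem pvSameShape_refl (V : List (List Bool)) : pvSameShape V V := ⟨rfl, fun _ => rfl⟩

theorem pvSameShape_trans {U V W : List (List Bool)} (h1 : pvSameShape U V) (h2 : pvSameShape V W) :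
    pvSameShape U W := ⟨h1.1.trans h2.1, fun k => (h1.2 k).trans (h2.2 k)⟩

theorem pvMSet_sameShape (V : List (List Bool)) (x y : Int) (hx0 : 0 ≤ x) :
    pvSameShape (pvMSet V x y) V := by
  unfold pvMSet
  cases h : PySem.List.pyGet? V x with
  | none => exact pvSameShape_refl V
  | some row =>
    show pvSameShape (PySem.List.pySetD V x (PySem.List.pySetD row y true)) V
    rw [pvPyGet_nonneg _ _ hx0] at h
    rw [PySem.List.pySetD_of_nonneg _ _ hx0]
    refine ⟨List.length_set .., fun k => ?_⟩
    rw [List.getElem?_set]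
    by_cases hk : x.toNat = k
    · subst hk
      rw [if_pos rfl]
      have hlt : x.toNat < V.length := by
        by_contra hc
        rw [List.getElem?_eq_none (by omega)] at h
        cases h
      rw [if_pos hlt]
      rw [List.getElem?_eq_getElem hlt] at h ⊢
      simp only [Option.getD_some, PySem.List.length_pySetD]
      simpa using (congrArg List.length (Option.some.inj h)).symm
    · rw [if_neg hk]

-- ---------- window / measure lemmas ----------

theorem mem_pvWinF {p : Int × Int} : p ∈ pvWinF ↔ pvWin p := by
  cases p with
  | mk a b =>
    simp only [pvWinF, Finset.mem_image, Finset.mem_product, Finset.mem_range, Prod.mk.injEq,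
      Prod.exists, pvWin]
    constructor
    · rintro ⟨u, v, ⟨hu, hv⟩, rfl, rfl⟩
      refine ⟨by omega, by omega, by omega, by omega⟩
    · rintro ⟨h1, h2, h3, h4⟩
      exact ⟨(a - 1).toNat, (b - 1).toNat, ⟨by omega, by omega⟩, by omega, by omega⟩

set_option maxRecDepth 4096 in
theorem pvWinF_card : pvWinF.card = 144 := by decide

theorem pvUwS_le (v0 : List (List Bool)) (S : Finset (Int × Int)) : pvUwS v0 S ≤ 144 :=
  le_trans (Finset.card_filter_le _ _) (le_of_eq pvWinF_card)

theorem pvUwS_mono (v0 : List (List Bool)) {S S' : Finset (Int × Int)} (h : S ⊆ S') :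
    pvUwS v0 S' ≤ pvUwS v0 S := by
  apply Finset.card_le_card
  intro w hw
  rw [Finset.mem_filter] at hw ⊢
  exact ⟨hw.1, hw.2.1, fun hc => hw.2.2 (h hc)⟩

theorem pvUwS_insert (v0 : List (List Bool)) (S : Finset (Int × Int)) (p : Int × Int)
    (hw : pvWin p) (h0 : pvMGetB v0 p.1 p.2 = false) (hp : p ∉ S) :
    pvUwS v0 (insert p S) + 1 = pvUwS v0 S := by
  have hset : pvWinF.filter (fun w => pvMGetB v0 w.1 w.2 = false ∧ w ∉ S) =
      insert p (pvWinF.filter (fun w => pvMGetB v0 w.1 w.2 = false ∧ w ∉ insert p S)) := by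
    ext w
    simp only [Finset.mem_filter, Finset.mem_insert]
    constructor
    · rintro ⟨hwW, hf, hns⟩
      by_cases hwp : w = p
      · exact Or.inl hwp
      · exact Or.inr ⟨hwW, hf, by simp [hwp, hns]⟩
    · rintro (rfl | ⟨hwW, hf, hns⟩)
      · exact ⟨mem_pvWinF.mpr hw, h0, hp⟩
      · exact ⟨hwW, hf, fun hc => hns (Or.inr hc)⟩
  unfold pvUwS
  rw [hset, Finset.card_insert_of_notMem (by simp [Finset.mem_filter])]

theorem pvUwS_pos (v0 : List (List Bool)) (S : Finset (Int × Int)) (p : Int × Int)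
    (hw : pvWin p) (h0 : pvMGetB v0 p.1 p.2 = false) (hp : p ∉ S) :
    1 ≤ pvUwS v0 S :=
  Finset.card_pos.mpr ⟨p, Finset.mem_filter.mpr ⟨mem_pvWinF.mpr hw, h0, hp⟩⟩

theorem pvWin_inShape (mat : List (List String)) (v0 V : List (List Bool))
    (hFS : pvFullShape mat v0) (hsh : pvSameShape V v0) (p : Int × Int) (hw : pvWin p) :
    0 ≤ p.1 ∧ p.1.toNat < V.length ∧ p.2.toNat < ((V[p.1.toNat]?).getD []).length ∧ 0 ≤ p.2 := by
  obtain ⟨h1, h2, h3, h4⟩ := hw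
  obtain ⟨hl, _, hk⟩ := hFS
  have hkk := (hk p.1.toNat (by omega)).1
  have hrow := hsh.2 p.1.toNat
  have hlen := hsh.1
  refine ⟨by omega, by omega, by omega, by omega⟩

-- ---------- the BFS loop characterisation ----------

-- the inner `for i in range(4)` body of A, as the fold step it compiles to
def pvBfsStepF (matrix : List (List String)) (x y : Int) :
    (List (Int × Int) × List (List Bool) × Int) → (Int × Int) → (List (Int × Int) × List (List Bool) × Int) :=
  fun s d =>
    if x + d.1 < 1 ∨ 9 ≤ x + d.1 ∨ y + d.2 < 1 ∨ 19 ≤ y + d.2 then s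
    else if pvMGetB s.2.1 (x + d.1) (y + d.2) = false ∧ pvMGetS matrix (x + d.1) (y + d.2) = "#" then
      (s.1 ++ [(x + d.1, y + d.2)], pvMSet s.2.1 (x + d.1) (y + d.2), s.2.2 + 1)
    else s

theorem pvBfsLoop_succ (matrix : List (List String)) (fuel : Nat) (x y : Int)
    (q : List (Int × Int)) (V : List (List Bool)) (c : Int) :
    pvBfsLoop matrix (fuel + 1) ((x, y) :: q) V c =
      pvBfsLoop matrix fuel (pvDirs.foldl (pvBfsStepF matrix x y) (q, V, c)).1
        (pvDirs.foldl (pvBfsStepF matrix x y) (q, V, c)).2.1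
        (pvDirs.foldl (pvBfsStepF matrix x y) (q, V, c)).2.2 := rfl

theorem pvBfs_fold (mat : List (List String)) (v0 : List (List Bool))
    (hFS : pvFullShape mat v0) (x y : Int) :
    ∀ (ds : List (Int × Int)), (∀ d ∈ ds, d ∈ pvDirs) →
    ∀ (q : List (Int × Int)) (V : List (List Bool)) (c : Int) (S : Finset (Int × Int)),
      pvSameShape V v0 → pvCons v0 V S → (∀ r ∈ q, r ∈ S) → c = (S.card : Int) → (x, y) ∈ S →
      ∀ Q W C, ds.foldl (pvBfsStepF mat x y) (q, V, c) = (Q, W, C) →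
      ∃ S' : Finset (Int × Int),
        pvSameShape W v0 ∧ pvCons v0 W S' ∧ S ⊆ S' ∧
        (∀ r ∈ Q, r ∈ S') ∧
        (∀ w ∈ S', w ∉ S → pvWin w ∧ w ∈ Q) ∧
        C = (S'.card : Int) ∧
        Q.length + pvUwS v0 S' = q.length + pvUwS v0 S ∧
        (∀ r ∈ q, r ∈ Q) ∧
        (∀ d ∈ ds, pvGood mat v0 (x + d.1, y + d.2) → (x + d.1, y + d.2) ∈ S') ∧
        (∀ T : Finset (Int × Int), S ⊆ T → pvClosed mat v0 T → (x, y) ∈ T → S' ⊆ T) := by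
  intro ds
  induction ds with
  | nil =>
    intro _ q V c S hsh hcons hq hc hxy Q W C heq
    simp only [List.foldl_nil, Prod.mk.injEq] at heq
    obtain ⟨rfl, rfl, rfl⟩ := heq
    exact ⟨S, hsh, hcons, Finset.Subset.refl S, hq, fun w _ hws => absurd ‹w ∈ S› hws,
      hc, rfl, fun r hr => hr, fun d hd => absurd hd (by simp), fun T hT _ _ => hT⟩
  | cons d ds ih =>
    intro hds q V c S hsh hcons hq hc hxy Q W C heq
    have hdDir : d ∈ pvDirs := hds d (List.mem_cons_self ..)
    have hds' : ∀ e ∈ ds, e ∈ pvDirs := fun e he => hds e (List.mem_cons_of_mem _ he)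
    rw [List.foldl_cons] at heq
    by_cases hrej : x + d.1 < 1 ∨ 9 ≤ x + d.1 ∨ y + d.2 < 1 ∨ 19 ≤ y + d.2
    · rw [show pvBfsStepF mat x y (q, V, c) d = (q, V, c) by
        unfold pvBfsStepF; rw [if_pos hrej]] at heq
      obtain ⟨S', a1, a2, a3, a4, a5, a6, a7, a8, a9, a10⟩ :=
        ih hds' q V c S hsh hcons hq hc hxy Q W C heq
      refine ⟨S', a1, a2, a3, a4, a5, a6, a7, a8, ?_, a10⟩
      intro e he hg
      rcases List.mem_cons.mp he with rfl | he'
      · refine absurd hg (fun hg' => ?_)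
        have w1 : 1 ≤ x + e.1 := hg'.1.1
        have w2 : x + e.1 < 9 := hg'.1.2.1
        have w3 : 1 ≤ y + e.2 := hg'.1.2.2.1
        have w4 : y + e.2 < 19 := hg'.1.2.2.2
        omega
      · exact a9 e he' hg
    · by_cases hacc : pvMGetB V (x + d.1) (y + d.2) = false ∧ pvMGetS mat (x + d.1) (y + d.2) = "#"
      · -- accepted neighbour
        set nb : Int × Int := (x + d.1, y + d.2) with hnb
        have hwin : pvWin nb := by simp only [pvWin, hnb]; omega
        have hfresh : pvMGetB v0 nb.1 nb.2 = false ∧ nb ∉ S := by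
          have h2 := hcons nb hwin
          rw [hacc.1] at h2
          constructor
          · cases hv0 : pvMGetB v0 nb.1 nb.2
            · rfl
            · rw [hv0] at h2; simp at h2
          · intro hcS
            rw [decide_eq_true hcS] at h2
            simp at h2
        have hgood : pvGood mat v0 nb := ⟨hwin, hfresh.1, hacc.2⟩
        have hish := pvWin_inShape mat v0 V hFS hsh nb hwin
        rw [show pvBfsStepF mat x y (q, V, c) d =
            (q ++ [nb], pvMSet V nb.1 nb.2, c + 1) by
          unfold pvBfsStepF; rw [if_neg hrej, if_pos hacc]] at heq
        have hcons2 : pvCons v0 (pvMSet V nb.1 nb.2) (insert nb S) := by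
          intro w hw
          have hwsh := pvWin_inShape mat v0 V hFS hsh w hw
          rw [pvMGetB_mset V nb.1 nb.2 w.1 w.2 hish.1 hish.2.2.2 hish.2.1 hish.2.2.1 hwsh.1 hwsh.2.2.2]
          by_cases hwnb : w = nb
          · rw [hwnb, if_pos ⟨rfl, rfl⟩, decide_eq_true (Finset.mem_insert_self nb S)]
            simp
          · rw [if_neg (fun hcomp => hwnb (Prod.ext hcomp.1 hcomp.2))]
            rw [hcons w hw]
            congr 1
            simp [Finset.mem_insert, hwnb]
        have hsh2 : pvSameShape (pvMSet V nb.1 nb.2) v0 :=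
          pvSameShape_trans (pvMSet_sameShape V nb.1 nb.2 hish.1) hsh
        have hq2 : ∀ r ∈ q ++ [nb], r ∈ insert nb S := by
          intro r hr
          rcases List.mem_append.mp hr with hr' | hr'
          · exact Finset.mem_insert_of_mem (hq r hr')
          · simp at hr'; subst hr'; exact Finset.mem_insert_self ..
        have hc2 : c + 1 = ((insert nb S).card : Int) := by
          rw [Finset.card_insert_of_notMem hfresh.2, hc]; push_cast; ring
        obtain ⟨S', a1, a2, a3, a4, a5, a6, a7, a8, a9, a10⟩ :=
          ih hds' (q ++ [nb]) (pvMSet V nb.1 nb.2) (c + 1) (insert nb S)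
            hsh2 hcons2 hq2 hc2 (Finset.mem_insert_of_mem hxy) Q W C heq
        have hnbS' : nb ∈ S' := a3 (Finset.mem_insert_self ..)
        refine ⟨S', a1, a2, fun z hz => a3 (Finset.mem_insert_of_mem hz), a4, ?_, a6, ?_, ?_, ?_, ?_⟩
        · intro w hw hws
          by_cases hwnb : w = nb
          · subst hwnb
            exact ⟨hwin, a8 nb (by simp)⟩
          · exact a5 w hw (by simp [Finset.mem_insert, hwnb, hws])
        · rw [a7, List.length_append]
          have := pvUwS_insert v0 S nb hwin hfresh.1 hfresh.2
          simp only [List.length_singleton]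
          omega
        · intro r hr; exact a8 r (List.mem_append_left _ hr)
        · intro e he hg
          rcases List.mem_cons.mp he with rfl | he'
          · exact hnbS'
          · exact a9 e he' hg
        · intro T hT hTc hxyT
          refine a10 T ?_ hTc hxyT
          intro z hz
          rcases Finset.mem_insert.mp hz with rfl | hz'
          · exact hTc (x, y) hxyT d hdDir hgood
          · exact hT hz'
      · -- in window but already visited or not '#'
        rw [show pvBfsStepF mat x y (q, V, c) d = (q, V, c) by
          unfold pvBfsStepF; rw [if_neg hrej, if_neg hacc]] at heq
        obtain ⟨S', a1, a2, a3, a4, a5, a6, a7, a8, a9, a10⟩ :=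
          ih hds' q V c S hsh hcons hq hc hxy Q W C heq
        refine ⟨S', a1, a2, a3, a4, a5, a6, a7, a8, ?_, a10⟩
        intro e he hg
        rcases List.mem_cons.mp he with rfl | he'
        · -- the test failed although the cell is good, so it is already in S
          obtain ⟨hgw, hg0, hgs⟩ := hg
          have hmem : (x + e.1, y + e.2) ∈ S := by
            have h2 := hcons _ hgw
            by_cases hS : (x + e.1, y + e.2) ∈ S
            · exact hS
            · exfalso
              rw [hg0, decide_eq_false hS] at h2
              exact hacc ⟨h2, hgs⟩
          exact a3 hmem
        · exact a9 e he' hg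

theorem pvBfs_run (mat : List (List String)) (v0 : List (List Bool)) (hFS : pvFullShape mat v0) :
    ∀ (fuel : Nat) (q : List (Int × Int)) (V : List (List Bool)) (c : Int) (S : Finset (Int × Int)),
      pvSameShape V v0 → pvCons v0 V S → (∀ r ∈ q, r ∈ S) →
      (∀ r ∈ S, r ∉ q → ∀ d ∈ pvDirs, pvGood mat v0 (r.1 + d.1, r.2 + d.2) → (r.1 + d.1, r.2 + d.2) ∈ S) →
      c = (S.card : Int) → q.length + pvUwS v0 S < fuel →
      ∃ S', (pvBfsLoop mat fuel q V c).2 = (S'.card : Int) ∧ S ⊆ S' ∧ pvClosed mat v0 S' ∧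
        ∀ T, S ⊆ T → pvClosed mat v0 T → S' ⊆ T := by
  intro fuel
  induction fuel with
  | zero => intro q V c S _ _ _ _ _ hfuel; omega
  | succ fuel ih =>
    intro q V c S hsh hcons hq hexc hc hfuel
    rcases q with _ | ⟨⟨x, y⟩, q'⟩
    · refine ⟨S, by simpa [pvBfsLoop] using hc, Finset.Subset.refl S, ?_, fun T hT _ => hT⟩
      intro p hp d hd hg
      exact hexc p hp (by simp) d hd hg
    ·
      rw [pvBfsLoop_succ]
      rcases hfold : pvDirs.foldl (pvBfsStepF mat x y) (q', V, c) with ⟨Q, W, C⟩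
      obtain ⟨S1, a1, a2, a3, a4, a5, a6, a7, a8, a9, a10⟩ :=
        pvBfs_fold mat v0 hFS x y pvDirs (fun _ h => h) q' V c S hsh hcons
          (fun r hr => hq r (List.mem_cons_of_mem _ hr)) hc (hq (x, y) (List.mem_cons_self ..))
          Q W C hfold
      have hexc1 : ∀ r ∈ S1, r ∉ Q → ∀ d ∈ pvDirs,
          pvGood mat v0 (r.1 + d.1, r.2 + d.2) → (r.1 + d.1, r.2 + d.2) ∈ S1 := by
        intro r hr hrQ d hd hg
        by_cases hrS : r ∈ S
        · by_cases hrxy : r = (x, y)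
          · subst hrxy
            exact a9 d hd hg
          · have hrq' : r ∉ q' := fun hc' => hrQ (a8 r hc')
            have : r ∉ (x, y) :: q' := by
              intro hc'
              rcases List.mem_cons.mp hc' with h | h
              · exact hrxy h
              · exact hrq' h
            exact a3 (hexc r hrS this d hd hg)
        · exact absurd ((a5 r hr hrS).2) hrQ
      have hfuel1 : Q.length + pvUwS v0 S1 < fuel := by
        simp only [List.length_cons] at hfuel
        omega
      obtain ⟨S', b1, b2, b3, b4⟩ := ih Q W C S1 a1 a2 a4 hexc1 a6 hfuel1
      refine ⟨S', b1, Finset.Subset.trans a3 b2, b3, ?_⟩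
      intro T hT hTc
      exact b4 T (a10 T hT hTc (hT (hq (x, y) (List.mem_cons_self ..)))) hTc

-- ---------- the DFS flood characterisation ----------

def pvFloodStepF (matrix : List (List String)) (fuel : Nat) (x y : Int) :
    (Int × List (List Bool)) → (Int × Int) → (Int × List (List Bool)) :=
  fun s d =>
    if (1 ≤ x + d.1 ∧ x + d.1 < 9) ∧ (1 ≤ y + d.2 ∧ y + d.2 < 19) ∧
        pvMGetB s.2 (x + d.1) (y + d.2) = false ∧ pvMGetS matrix (x + d.1) (y + d.2) = "#" then
      (s.1 + (pvFlood matrix fuel (x + d.1) (y + d.2) s.2).1,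
        (pvFlood matrix fuel (x + d.1) (y + d.2) s.2).2)
    else s

theorem pvFlood_succ (matrix : List (List String)) (fuel : Nat) (x y : Int) (V : List (List Bool)) :
    pvFlood matrix (fuel + 1) x y V =
      pvDirs.foldl (pvFloodStepF matrix fuel x y) (1, pvMSet V x y) := rfl

-- the full statement of the DFS characterisation, as a predicate on the fuel
def pvFloodP (mat : List (List String)) (v0 : List (List Bool)) (fuel : Nat) : Prop :=
  ∀ (p : Int × Int) (V : List (List Bool)) (S : Finset (Int × Int)),
    pvSameShape V v0 → pvCons v0 V S →
    (0 ≤ p.1 ∧ p.1.toNat < V.length ∧ p.2.toNat < ((V[p.1.toNat]?).getD []).length ∧ 0 ≤ p.2) →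
    p ∉ S →
    (if pvWin p ∧ pvMGetB V p.1 p.2 = false then pvUwS v0 S else pvUwS v0 S + 1) ≤ fuel →
    ∃ S' : Finset (Int × Int),
      pvSameShape (pvFlood mat fuel p.1 p.2 V).2 v0 ∧
      pvCons v0 (pvFlood mat fuel p.1 p.2 V).2 S' ∧
      S ⊆ S' ∧ (∀ w ∈ S', w ∉ S → pvWin w) ∧ (pvWin p → p ∈ S') ∧
      (pvFlood mat fuel p.1 p.2 V).1 = (S'.card : Int) - (S.card : Int) + (if pvWin p then 0 else 1) ∧
      (∀ w ∈ S', w ∉ S → ∀ d ∈ pvDirs, pvGood mat v0 (w.1 + d.1, w.2 + d.2) → (w.1 + d.1, w.2 + d.2) ∈ S') ∧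
      (∀ d ∈ pvDirs, pvGood mat v0 (p.1 + d.1, p.2 + d.2) → (p.1 + d.1, p.2 + d.2) ∈ S') ∧
      (∀ T : Finset (Int × Int), S ⊆ T → pvClosed mat v0 T → p ∈ T → S' ⊆ T)

theorem pvFlood_fold (mat : List (List String)) (v0 : List (List Bool)) (hFS : pvFullShape mat v0)
    (fuel : Nat) (IH : pvFloodP mat v0 fuel) (x y : Int) :
    ∀ (ds : List (Int × Int)), (∀ d ∈ ds, d ∈ pvDirs) →
    ∀ (t : Int) (V : List (List Bool)) (S : Finset (Int × Int)) (k : Int),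
      pvSameShape V v0 → pvCons v0 V S → t = (S.card : Int) + k → pvUwS v0 S ≤ fuel →
      ∀ T2 W2, ds.foldl (pvFloodStepF mat fuel x y) (t, V) = (T2, W2) →
      ∃ S' : Finset (Int × Int),
        pvSameShape W2 v0 ∧ pvCons v0 W2 S' ∧ S ⊆ S' ∧
        (∀ w ∈ S', w ∉ S → pvWin w) ∧
        T2 = (S'.card : Int) + k ∧
        (∀ w ∈ S', w ∉ S → ∀ d ∈ pvDirs, pvGood mat v0 (w.1 + d.1, w.2 + d.2) → (w.1 + d.1, w.2 + d.2) ∈ S') ∧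
        (∀ d ∈ ds, pvGood mat v0 (x + d.1, y + d.2) → (x + d.1, y + d.2) ∈ S') ∧
        (∀ T : Finset (Int × Int), S ⊆ T → pvClosed mat v0 T → (x, y) ∈ T → S' ⊆ T) := by
  intro ds
  induction ds with
  | nil =>
    intro _ t V S k hsh hcons ht hfuel T2 W2 heq
    simp only [List.foldl_nil, Prod.mk.injEq] at heq
    obtain ⟨rfl, rfl⟩ := heq
    exact ⟨S, hsh, hcons, Finset.Subset.refl S, fun w _ hws => absurd ‹w ∈ S› hws, ht,
      fun w _ hws => absurd ‹w ∈ S› hws, fun d hd => absurd hd (by simp), fun T hT _ _ => hT⟩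
  | cons d ds ih =>
    intro hds t V S k hsh hcons ht hfuel T2 W2 heq
    have hdDir : d ∈ pvDirs := hds d (List.mem_cons_self ..)
    have hds' : ∀ e ∈ ds, e ∈ pvDirs := fun e he => hds e (List.mem_cons_of_mem _ he)
    rw [List.foldl_cons] at heq
    by_cases hacc : (1 ≤ x + d.1 ∧ x + d.1 < 9) ∧ (1 ≤ y + d.2 ∧ y + d.2 < 19) ∧
        pvMGetB V (x + d.1) (y + d.2) = false ∧ pvMGetS mat (x + d.1) (y + d.2) = "#"
    · -- recursive call into the fresh neighbour
      set nb : Int × Int := (x + d.1, y + d.2) with hnb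
      have hwin : pvWin nb := ⟨hacc.1.1, hacc.1.2, hacc.2.1.1, hacc.2.1.2⟩
      have hfresh : pvMGetB v0 nb.1 nb.2 = false ∧ nb ∉ S := by
        have h2 := hcons nb hwin
        rw [hacc.2.2.1] at h2
        constructor
        · cases hv0 : pvMGetB v0 nb.1 nb.2
          · rfl
          · rw [hv0] at h2; simp at h2
        · intro hcS
          rw [decide_eq_true hcS] at h2
          simp at h2
      have hgood : pvGood mat v0 nb := ⟨hwin, hfresh.1, hacc.2.2.2⟩
      have hish := pvWin_inShape mat v0 V hFS hsh nb hwin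
      rw [show pvFloodStepF mat fuel x y (t, V) d =
          (t + (pvFlood mat fuel nb.1 nb.2 V).1, (pvFlood mat fuel nb.1 nb.2 V).2) by
        unfold pvFloodStepF; rw [if_pos hacc]] at heq
      have hfuel' : (if pvWin nb ∧ pvMGetB V nb.1 nb.2 = false then pvUwS v0 S else pvUwS v0 S + 1) ≤ fuel := by
        rw [if_pos ⟨hwin, hacc.2.2.1⟩]; exact hfuel
      obtain ⟨S2, b1, b2, b3, b4, b5, b6, b7, b8, b9⟩ :=
        IH nb V S hsh hcons hish hfresh.2 hfuel'
      have hnbS2 : nb ∈ S2 := b5 hwin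
      have ht2 : t + (pvFlood mat fuel nb.1 nb.2 V).1 = (S2.card : Int) + k := by
        rw [b6, if_pos hwin, ht]; ring
      have hfuel2 : pvUwS v0 S2 ≤ fuel := le_trans (pvUwS_mono v0 b3) hfuel
      obtain ⟨S', c1, c2, c3, c4, c5, c6, c7, c8⟩ :=
        ih hds' (t + (pvFlood mat fuel nb.1 nb.2 V).1) (pvFlood mat fuel nb.1 nb.2 V).2
          S2 k b1 b2 ht2 hfuel2 T2 W2 heq
      refine ⟨S', c1, c2, Finset.Subset.trans b3 c3, ?_, c5, ?_, ?_, ?_⟩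
      · intro w hw hws
        by_cases hwS2 : w ∈ S2
        · exact b4 w hwS2 hws
        · exact c4 w hw hwS2
      · intro w hw hws e he hg
        by_cases hwS2 : w ∈ S2
        · exact c3 (b7 w hwS2 hws e he hg)
        · exact c6 w hw hwS2 e he hg
      · intro e he hg
        rcases List.mem_cons.mp he with rfl | he'
        · exact c3 hnbS2
        · exact c7 e he' hg
      · intro T hT hTc hxyT
        have hnbT : nb ∈ T := hTc (x, y) hxyT d hdDir hgood
        exact c8 T (b9 T hT hTc hnbT) hTc hxyT
    · -- rejected neighbour (out of window, already visited, or not '#')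
      rw [show pvFloodStepF mat fuel x y (t, V) d = (t, V) by
        unfold pvFloodStepF; rw [if_neg hacc]] at heq
      obtain ⟨S', c1, c2, c3, c4, c5, c6, c7, c8⟩ :=
        ih hds' t V S k hsh hcons ht hfuel T2 W2 heq
      refine ⟨S', c1, c2, c3, c4, c5, c6, ?_, c8⟩
      intro e he hg
      rcases List.mem_cons.mp he with rfl | he'
      · obtain ⟨hgw, hg0, hgs⟩ := hg
        have hmem : (x + e.1, y + e.2) ∈ S := by
          have h2 := hcons _ hgw
          by_cases hS : (x + e.1, y + e.2) ∈ S
          · exact hS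
          · exfalso
            rw [hg0, decide_eq_false hS] at h2
            exact hacc ⟨⟨hgw.1, hgw.2.1⟩, ⟨hgw.2.2.1, hgw.2.2.2⟩, h2, hgs⟩
        exact c3 hmem
      · exact c7 e he' hg

theorem pvFlood_run (mat : List (List String)) (v0 : List (List Bool)) (hFS : pvFullShape mat v0) :
    ∀ fuel : Nat, pvFloodP mat v0 fuel := by
  intro fuel
  induction fuel with
  | zero =>
    intro p V S hsh hcons hish hpS hfuel
    exfalso
    split at hfuel
    · rename_i hfw
      have h2 := hcons p hfw.1
      rw [hfw.2] at h2
      have hv0 : pvMGetB v0 p.1 p.2 = false := by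
        cases hv : pvMGetB v0 p.1 p.2
        · rfl
        · rw [hv] at h2; simp at h2
      have := pvUwS_pos v0 S p hfw.1 hv0 hpS
      omega
    · omega
  | succ fuel ih =>
    rintro ⟨x, y⟩ V S hsh hcons hish hpS hfuel
    simp only at hish
    rw [pvFlood_succ]
    rcases hfold : pvDirs.foldl (pvFloodStepF mat fuel x y) (1, pvMSet V x y) with ⟨T2, W2⟩
    -- the ghost set after marking the seed
    set S1 : Finset (Int × Int) := if pvWin (x, y) then insert (x, y) S else S with hS1
    have hsub1 : S ⊆ S1 := by
      rw [hS1]; split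
      · exact Finset.subset_insert ..
      · exact Finset.Subset.refl S
    have hsh1 : pvSameShape (pvMSet V x y) v0 :=
      pvSameShape_trans (pvMSet_sameShape V x y hish.1) hsh
    have hcons1 : pvCons v0 (pvMSet V x y) S1 := by
      intro w hw
      have hwsh := pvWin_inShape mat v0 V hFS hsh w hw
      rw [pvMGetB_mset V x y w.1 w.2 hish.1 hish.2.2.2 hish.2.1 hish.2.2.1 hwsh.1 hwsh.2.2.2]
      by_cases hwp : w = (x, y)
      · have hwS1 : w ∈ S1 := by
          rw [hS1, if_pos (hwp ▸ hw)]
          rw [hwp]; exact Finset.mem_insert_self ..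
        rw [hwp, if_pos ⟨rfl, rfl⟩, decide_eq_true (hwp ▸ hwS1)]
        simp
      · rw [if_neg (fun hcomp => hwp (Prod.ext hcomp.1 hcomp.2))]
        rw [hcons w hw]
        congr 1
        rw [hS1]
        split
        · simp [Finset.mem_insert, hwp]
        · rfl
    have hcard1 : (S1.card : Int) = (S.card : Int) + (if pvWin (x, y) then 1 else 0) := by
      rw [hS1]; split
      · rw [Finset.card_insert_of_notMem hpS]; push_cast; ring
      · ring
    have ht1 : (1 : Int) = (S1.card : Int) + (1 - (S1.card : Int)) := by ring
    have hfuel1 : pvUwS v0 S1 ≤ fuel := by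
      split at hfuel
      · rename_i hfw
        -- the seed is a fresh window cell: marking it decreases the measure
        have h2 := hcons (x, y) hfw.1
        rw [hfw.2] at h2
        have hv0 : pvMGetB v0 x y = false := by
          cases hv : pvMGetB v0 x y
          · rfl
          · rw [show pvMGetB v0 (x, y).1 (x, y).2 = pvMGetB v0 x y from rfl, hv] at h2
            simp at h2
        have hins := pvUwS_insert v0 S (x, y) hfw.1 hv0 hpS
        rw [hS1, if_pos hfw.1]
        omega
      · have hle : pvUwS v0 S1 ≤ pvUwS v0 S := pvUwS_mono v0 hsub1
        omega
    obtain ⟨S', c1, c2, c3, c4, c5, c6, c7, c8⟩ :=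
      pvFlood_fold mat v0 hFS fuel ih x y pvDirs (fun _ h => h) 1 (pvMSet V x y) S1
        (1 - (S1.card : Int)) hsh1 hcons1 ht1 hfuel1 T2 W2 hfold
    have hS1win : ∀ w ∈ S1, w ∉ S → pvWin w := by
      intro w hw hws
      rw [hS1] at hw
      split at hw
      · rename_i hwn
        rcases Finset.mem_insert.mp hw with rfl | h
        · exact hwn
        · exact absurd h hws
      · exact absurd hw hws
    refine ⟨S', c1, c2, Finset.Subset.trans hsub1 c3, ?_, ?_, ?_, ?_, ?_, ?_⟩
    · intro w hw hws
      by_cases hwS1 : w ∈ S1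
      · exact hS1win w hwS1 hws
      · exact c4 w hw hwS1
    · intro hwxy
      exact c3 (by rw [hS1, if_pos hwxy]; exact Finset.mem_insert_self ..)
    · rw [c5, hcard1]
      split <;> ring
    · intro w hw hws e he hg
      by_cases hwS1 : w ∈ S1
      · have hwxy : w = (x, y) := by
          rw [hS1] at hwS1
          split at hwS1
          · rcases Finset.mem_insert.mp hwS1 with h | h
            · exact h
            · exact absurd h hws
          · exact absurd hwS1 hws
        subst hwxy
        exact c7 e he hg
      · exact c6 w hw hwS1 e he hg
    · intro e he hg
      exact c7 e he hg
    · intro T hT hTc hpT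
      refine c8 T ?_ hTc hpT
      rw [hS1]
      split
      · intro z hz
        rcases Finset.mem_insert.mp hz with rfl | hz'
        · exact hpT
        · exact hT hz'
      · exact hT

-- ---------- the degenerate case: no neighbour of the seed is in the window ----------

theorem pvBfs_noTouch (mat : List (List String)) (i j : Int) (hnt : pvNoTouch i j)
    (q : List (Int × Int)) (V : List (List Bool)) (c : Int) :
    pvDirs.foldl (pvBfsStepF mat i j) (q, V, c) = (q, V, c) := by
  have hstep : ∀ (s : List (Int × Int) × List (List Bool) × Int) (d : Int × Int), d ∈ pvDirs →
      pvBfsStepF mat i j s d = s := by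
    intro s d hd
    have hw : ¬ (1 ≤ i + d.1 ∧ i + d.1 < 9 ∧ 1 ≤ j + d.2 ∧ j + d.2 < 19) := hnt d hd
    unfold pvBfsStepF
    rw [if_pos (show i + d.1 < 1 ∨ 9 ≤ i + d.1 ∨ j + d.2 < 1 ∨ 19 ≤ j + d.2 by omega)]
  show List.foldl _ (q, V, c) pvDirs = (q, V, c)
  rw [show pvDirs = [((1 : Int), (0 : Int)), (0, -1), (-1, 0), (0, 1)] from rfl]
  simp only [List.foldl_cons, List.foldl_nil]
  rw [hstep _ _ (by decide), hstep _ _ (by decide), hstep _ _ (by decide), hstep _ _ (by decide)]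

theorem pvFlood_noTouch (mat : List (List String)) (fuel : Nat) (i j : Int) (hnt : pvNoTouch i j)
    (s0 : Int × List (List Bool)) :
    pvDirs.foldl (pvFloodStepF mat fuel i j) s0 = s0 := by
  have hstep : ∀ (s : Int × List (List Bool)) (d : Int × Int), d ∈ pvDirs →
      pvFloodStepF mat fuel i j s d = s := by
    intro s d hd
    have hw : ¬ (1 ≤ i + d.1 ∧ i + d.1 < 9 ∧ 1 ≤ j + d.2 ∧ j + d.2 < 19) := hnt d hd
    unfold pvFloodStepF
    rw [if_neg (fun hcon => hw ⟨hcon.1.1, hcon.1.2, hcon.2.1.1, hcon.2.1.2⟩)]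
  show List.foldl _ s0 pvDirs = s0
  rw [show pvDirs = [((1 : Int), (0 : Int)), (0, -1), (-1, 0), (0, 1)] from rfl]
  simp only [List.foldl_cons, List.foldl_nil]
  rw [hstep _ _ (by decide), hstep _ _ (by decide), hstep _ _ (by decide), hstep _ _ (by decide)]

-- ===== VERDICT (by name: the statement is the Claim_ definition above) =====
theorem sharps_bfs_spec : Claim_equal_sharps_bfs := by
  unfold Claim_equal_sharps_bfs
  intro mat i j vis _hdom hpre
  unfold Spec_sharps_bfs
  rcases hpre with ⟨hish, hFS⟩ | ⟨_hseed, hnt⟩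
  · -- main case: full 9×19 grids, non-negative in-range seed
    have hish' : 0 ≤ i ∧ i.toNat < vis.length ∧ j.toNat < ((vis[i.toNat]?).getD []).length ∧ 0 ≤ j := by
      obtain ⟨h1, h2, h3, h4⟩ := hish
      exact ⟨h1, by omega, by omega, h3⟩
    -- A-side characterisation
    have hconsA : pvCons vis (pvMSet vis i j) {(i, j)} := by
      intro w hw
      have hwsh := pvWin_inShape mat vis vis hFS (pvSameShape_refl vis) w hw
      rw [pvMGetB_mset vis i j w.1 w.2 hish'.1 hish'.2.2.2 hish'.2.1 hish'.2.2.1 hwsh.1 hwsh.2.2.2]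
      by_cases hwp : w = (i, j)
      · rw [hwp, if_pos ⟨rfl, rfl⟩, decide_eq_true (Finset.mem_singleton_self _)]
        simp
      · rw [if_neg (fun hcomp => hwp (Prod.ext hcomp.1 hcomp.2))]
        rw [decide_eq_false (by simp [hwp])]
        simp
    obtain ⟨SA, a1, a2, a3, a4⟩ :=
      pvBfs_run mat vis hFS 400 [(i, j)] (pvMSet vis i j) 1 {(i, j)}
        (pvSameShape_trans (pvMSet_sameShape vis i j hish'.1) (pvSameShape_refl vis))
        hconsA
        (by intro r hr; simp at hr; simp [hr])
        (by
          intro r hr hrq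
          exfalso
          exact hrq (by simpa using Finset.mem_singleton.mp hr))
        (by simp)
        (by
          have := pvUwS_le vis ({(i, j)} : Finset (Int × Int))
          simp only [List.length_cons, List.length_nil]
          omega)
    -- B-side characterisation
    have hconsB : pvCons vis vis (∅ : Finset (Int × Int)) := by
      intro w _
      simp
    obtain ⟨SB, b1, b2, b3, b4, b5, b6, b7, b8, b9⟩ :=
      pvFlood_run mat vis hFS 400 (i, j) vis ∅ (pvSameShape_refl vis) hconsB hish'
        (Finset.notMem_empty _)
        (by
          have := pvUwS_le vis (∅ : Finset (Int × Int))
          split <;> omega)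
    -- the two reached sets coincide (up to the seed itself)
    have hAB : SA = insert (i, j) SB := by
      apply Finset.Subset.antisymm
      · -- SA is minimal; insert (i,j) SB is closed and contains the seed
        apply a4
        · intro z hz
          rw [Finset.mem_singleton.mp hz]
          exact Finset.mem_insert_self ..
        · intro p hp d hd hg
          rcases Finset.mem_insert.mp hp with rfl | hp'
          · exact Finset.mem_insert_of_mem (b8 d hd hg)
          · exact Finset.mem_insert_of_mem (b7 p hp' (fun hc => absurd hc (Finset.notMem_empty p)) d hd hg)
      · -- SB is minimal; SA is closed and contains the seed
        have hseedA : (i, j) ∈ SA := a2 (Finset.mem_singleton_self _)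
        have hBsubA : SB ⊆ SA := b9 SA (Finset.empty_subset SA) a3 hseedA
        intro z hz
        rcases Finset.mem_insert.mp hz with rfl | hz'
        · exact hseedA
        · exact hBsubA hz'
    -- counts coincide
    have hcount : (pvBfsLoop mat 400 [(i, j)] (pvMSet vis i j) 1).2 = (pvFlood mat 400 i j vis).1 := by
      rw [a1, show (pvFlood mat 400 i j vis).1 = (pvFlood mat 400 (i, j).1 (i, j).2 vis).1 from rfl, b6]
      rw [hAB]
      by_cases hwxy : pvWin (i, j)
      · rw [if_pos hwxy]
        rw [Finset.insert_eq_self.mpr (b5 hwxy)]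
        simp
      · rw [if_neg hwxy]
        have hnotB : (i, j) ∉ SB := fun hc =>
          hwxy (b4 (i, j) hc (fun hc' => absurd hc' (Finset.notMem_empty _)))
        rw [Finset.card_insert_of_notMem hnotB]
        push_cast
        simp
    show sharps_bfs mat i j vis = sharps_bfs_alt mat i j vis
    unfold sharps_bfs sharps_bfs_alt
    simp only []
    rw [hcount]
  · -- degenerate case: the seed's neighbourhood misses the window; both count exactly 1
    show sharps_bfs mat i j vis = sharps_bfs_alt mat i j vis
    unfold sharps_bfs sharps_bfs_alt
    simp only []
    rw [show (400 : Nat) = 399 + 1 from rfl, pvBfsLoop_succ, pvBfs_noTouch mat i j hnt,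
      pvFlood_succ, pvFlood_noTouch mat 399 i j hnt]
    rfl
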